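-- pv_equiv track=rewrite | github.com/emcdona1/ocr_handwritten_labels | Helper/GetWordsInformation.py | GetClassifiedCategoriesInOrder
-- ===== SOURCE A (Python) =====
-- def GetClassifiedCategoriesInOrder(mainCategories, classifiedCategories):
--     categories = []
--     for c in mainCategories:
--         if c in classifiedCategories:
--             categories.append(c)
--     # add any user added WordCategories at the end
--     for c in sorted(classifiedCategories):
--         if c not in categories:
--             categories.append(c)
--     return categories
--     pass
-- ===== SOURCE B (Python) =====
-- def GetClassifiedCategoriesInOrder(mainCategories, classifiedCategories):
--     # decorate-sort-undecorate: one stable sort on a (tag, tiebreak) key builds the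
--     # whole ordering; main-order survivors get tag 0 (stability keeps their order),
--     # deduped extras get tag 1 keyed by their own name.
--     clsSet = set(classifiedCategories)
--     mainSet = set(mainCategories)
--     tagged = [(0, "", c) for c in mainCategories if c in clsSet]
--     tagged += [(1, c, c) for c in dict.fromkeys(classifiedCategories) if c not in mainSet]
--     tagged.sort(key=lambda t: (t[0], t[1]))
--     return [t[2] for t in tagged]
-- ===== Notes on version B (the rewrite author's own statement) =====
-- stated objective: alternative
-- what changed: Instead of two accumulating loops with membership scans on growing lists, B tags each item (tag 0 for main-order survivors, tag 1 with the name as tiebreak for deduped extras) and lets ONE stable sort on the (tag, name) key produce the entire output order, then projects the values; memberships are hash-set lookups.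
import Mathlib
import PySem

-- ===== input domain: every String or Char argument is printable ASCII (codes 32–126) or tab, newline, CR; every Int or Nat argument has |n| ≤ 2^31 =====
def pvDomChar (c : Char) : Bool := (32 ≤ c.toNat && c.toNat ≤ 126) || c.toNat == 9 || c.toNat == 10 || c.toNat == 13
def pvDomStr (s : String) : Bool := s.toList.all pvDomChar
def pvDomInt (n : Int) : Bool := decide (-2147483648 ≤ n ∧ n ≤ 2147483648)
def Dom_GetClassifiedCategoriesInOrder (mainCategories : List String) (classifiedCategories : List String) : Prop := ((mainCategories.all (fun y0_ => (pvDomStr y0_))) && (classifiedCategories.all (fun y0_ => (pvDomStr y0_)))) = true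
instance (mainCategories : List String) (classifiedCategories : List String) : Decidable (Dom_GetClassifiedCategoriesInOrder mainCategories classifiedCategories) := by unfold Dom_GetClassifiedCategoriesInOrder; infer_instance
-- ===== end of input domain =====

-- B replaces A's two accumulating loops by decorate-sort-undecorate: one stable sort
-- on a (tag, name) key produces the whole output order; same return value.

-- ===== PORT A =====
def GetClassifiedCategoriesInOrder (mainCategories : List String) (classifiedCategories : List String) : List String :=
  -- categories = []; for c in mainCategories: if c in classifiedCategories: categories.append(c)
  let categories : List String :=
    mainCategories.foldl (fun acc c => if c ∈ classifiedCategories then acc ++ [c] else acc) []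
  -- for c in sorted(classifiedCategories): if c not in categories: categories.append(c)
  (PySem.List.sorted classifiedCategories (fun x => x) false).foldl
    (fun acc c => if c ∉ acc then acc ++ [c] else acc) categories

-- ===== PORT B =====
def GetClassifiedCategoriesInOrder_alt (mainCategories : List String) (classifiedCategories : List String) : List String :=
  let clsSet : PySem.Set String := PySem.Set.ofList classifiedCategories
  let mainSet : PySem.Set String := PySem.Set.ofList mainCategories
  -- tagged = [(0, "", c) for c in mainCategories if c in clsSet]
  -- tagged += [(1, c, c) for c in dict.fromkeys(classifiedCategories) if c not in mainSet]
  let tagged : List (Int × String × String) :=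
    (mainCategories.filter (fun c => PySem.Set.contains clsSet c)).map (fun c => ((0 : Int), "", c))
      ++ ((PySem.List.dedup classifiedCategories).filter
            (fun c => !PySem.Set.contains mainSet c)).map (fun c => ((1 : Int), c, c))
  -- tagged.sort(key=lambda t: (t[0], t[1]))
  let sortedTagged := PySem.List.sorted2 tagged (fun t => t.1) (fun t => t.2.1) false
  -- return [t[2] for t in tagged]
  sortedTagged.map (fun t => t.2.2)

-- ===== PRECONDITION & SPEC =====
def Spec_GetClassifiedCategoriesInOrder (mainCategories : List String) (classifiedCategories : List String) (out : List String) : Prop := out = GetClassifiedCategoriesInOrder_alt mainCategories classifiedCategories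
instance (mainCategories : List String) (classifiedCategories : List String) (out : List String) : Decidable (Spec_GetClassifiedCategoriesInOrder mainCategories classifiedCategories out) := by unfold Spec_GetClassifiedCategoriesInOrder; infer_instance

-- ===== CLAIM (what is proved, stated in full; the proofs are below) =====
def Claim_equal_GetClassifiedCategoriesInOrder : Prop := ∀ (mainCategories : List String) (classifiedCategories : List String), Dom_GetClassifiedCategoriesInOrder mainCategories classifiedCategories → Spec_GetClassifiedCategoriesInOrder mainCategories classifiedCategories (GetClassifiedCategoriesInOrder mainCategories classifiedCategories)

-- ===== LEMMAS AND PROOFS =====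

-- B's lexicographic tuple-key comparator, as sorted2 builds it for reverse=false.
def pvBefore (a b : Int × String × String) : Bool :=
  decide (a.1 < b.1) || (!decide (b.1 < a.1) && decide (a.2.1 < b.2.1))

theorem sorted2_eq_foldl (xs : List (Int × String × String)) :
    PySem.List.sorted2 xs (fun t => t.1) (fun t => t.2.1) false =
      xs.foldl (fun acc x => PySem.List.insertBy pvBefore x acc) [] := rfl

-- A's first loop is a filter.
theorem firstLoop_eq_filter (main cls : List String) :
    main.foldl (fun acc c => if c ∈ cls then acc ++ [c] else acc) [] =
      main.filter (fun c => decide (c ∈ cls)) := by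
  simpa using PySem.List.foldl_append_ite_eq_filter (p := fun c => c ∈ cls) (l := main) (acc := [])

-- A's second loop is Set.update.
theorem secondLoop_eq_update (s pre : List String) :
    s.foldl (fun acc c => if c ∉ acc then acc ++ [c] else acc) pre = PySem.Set.update pre s := by
  rw [PySem.Set.update]
  congr 1
  funext acc c
  rw [PySem.Set.add_eq_ite]
  by_cases h : c ∈ acc <;> simp [h]

-- ofList is a sublist of its argument.
theorem ofList_sublist (xs : List String) : (PySem.Set.ofList xs).Sublist xs := by
  induction xs with
  | nil => simp [PySem.Set.ofList]
  | cons x t ih =>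
      rw [PySem.Set.ofList_cons]
      exact List.Sublist.cons₂ x (((by simp [PySem.Set.discard] : (PySem.Set.discard (PySem.Set.ofList t) x).Sublist (PySem.Set.ofList t))).trans ih)

-- the extras produced by A's second loop are exactly the sorted set difference
theorem extras_eq (main cls : List String) :
    (PySem.Set.ofList (PySem.List.sorted cls (fun x => x) false)).filter
        (fun y => !(PySem.Set.contains (main.filter (fun c => decide (c ∈ cls))) y)) =
      PySem.List.sorted (PySem.Set.diff (PySem.Set.ofList cls) (PySem.Set.ofList main)) (fun x => x) false := by
  set ys := (PySem.Set.ofList (PySem.List.sorted cls (fun x => x) false)).filter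
      (fun y => !(PySem.Set.contains (main.filter (fun c => decide (c ∈ cls))) y)) with hys
  have hmem_ys : ∀ a, a ∈ ys ↔ a ∈ cls ∧ a ∉ main := by
    intro a
    simp [hys, PySem.Set.mem_ofList, PySem.List.mem_sorted, PySem.Set.contains]
    tauto
  have hnodup_ys : ys.Nodup := List.Nodup.filter _ (PySem.Set.nodup_ofList _)
  have hpair_le : ys.Pairwise (fun a b : String => a ≤ b) := by
    have h1 : (PySem.List.sorted cls (fun x => x) false).Pairwise (fun a b : String => a ≤ b) :=
      PySem.List.sorted_pairwise cls (fun x => x)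
    have hsub : ys.Sublist (PySem.List.sorted cls (fun x => x) false) :=
      List.filter_sublist.trans (ofList_sublist (PySem.List.sorted cls (fun x => x) false))
    exact h1.sublist hsub
  have hpair_lt : ys.Pairwise (fun a b : String => a < b) :=
    (hpair_le.and hnodup_ys).imp (fun h => lt_of_le_of_ne h.1 h.2)
  have hperm : ys.Perm (PySem.Set.diff (PySem.Set.ofList cls) (PySem.Set.ofList main)) := by
    rw [List.perm_ext_iff_of_nodup hnodup_ys (PySem.Set.nodup_diff _ _ (PySem.Set.nodup_ofList _))]
    intro a
    rw [hmem_ys a, PySem.Set.mem_diff]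
    simp [PySem.Set.mem_ofList]
  exact (PySem.List.sorted_eq_of_perm_of_pairwise_lt _ _ (fun x => x) hperm hpair_lt).symm

-- insertBy skips a prefix it is never 'before'.
theorem insertBy_append_not_before (x : Int × String × String) (M s : List (Int × String × String))
    (h : ∀ m ∈ M, pvBefore x m = false) :
    PySem.List.insertBy pvBefore x (M ++ s) = M ++ PySem.List.insertBy pvBefore x s := by
  induction M with
  | nil => simp
  | cons m t ih =>
      have hm : pvBefore x m = false := h m (List.mem_cons_self)
      simp [PySem.List.insertBy, hm, ih (fun y hy => h y (List.mem_cons_of_mem _ hy))]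

-- folding insertBy over elements never 'before' the accumulator just appends them.
theorem foldl_insertBy_id (M : List (Int × String × String))
    (hMM : ∀ x ∈ M, ∀ y ∈ M, pvBefore x y = false) :
    ∀ acc : List (Int × String × String), (∀ x ∈ M, ∀ y ∈ acc, pvBefore x y = false) →
      M.foldl (fun acc x => PySem.List.insertBy pvBefore x acc) acc = acc ++ M := by
  induction M with
  | nil => intro acc _; simp
  | cons m t ih =>
      intro acc hacc
      have h1 : PySem.List.insertBy pvBefore m acc = acc ++ [m] :=
        PySem.List.insertBy_of_forall_not_before _ _ _ (hacc m List.mem_cons_self)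
      have ht := ih (fun x hx y hy => hMM x (List.mem_cons_of_mem _ hx) y (List.mem_cons_of_mem _ hy))
        (acc ++ [m]) (by
          intro x hx y hy
          rcases List.mem_append.1 hy with hy | hy
          · exact hacc x (List.mem_cons_of_mem _ hx) y hy
          · simp only [List.mem_singleton] at hy
            exact hy ▸ hMM x (List.mem_cons_of_mem _ hx) m List.mem_cons_self)
      simp only [List.foldl_cons, h1, ht, List.append_assoc, List.singleton_append]

-- a fold of insertions that never pass the prefix M factors through it.
theorem foldl_insertBy_append (E M : List (Int × String × String))
    (hEM : ∀ x ∈ E, ∀ m ∈ M, pvBefore x m = false) :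
    ∀ s, E.foldl (fun acc x => PySem.List.insertBy pvBefore x acc) (M ++ s) =
      M ++ E.foldl (fun acc x => PySem.List.insertBy pvBefore x acc) s := by
  induction E with
  | nil => intro s; simp
  | cons e t ih =>
      intro s
      simp only [List.foldl_cons,
        insertBy_append_not_before e M s (hEM e List.mem_cons_self)]
      exact ih (fun x hx m hm => hEM x (List.mem_cons_of_mem _ hx) m hm) _

-- insertBy only depends on the comparator's values against the list.
theorem insertBy_congr {α : Type} (b1 b2 : α → α → Bool) (x : α) (ys : List α)
    (h : ∀ y ∈ ys, b1 x y = b2 x y) :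
    PySem.List.insertBy b1 x ys = PySem.List.insertBy b2 x ys := by
  induction ys with
  | nil => rfl
  | cons y t ih =>
      simp only [PySem.List.insertBy, h y List.mem_cons_self,
        ih (fun z hz => h z (List.mem_cons_of_mem _ hz))]

theorem foldl_insertBy_congr {α : Type} (b1 b2 : α → α → Bool) :
    ∀ (E acc : List α), (∀ x ∈ E, ∀ y ∈ acc, b1 x y = b2 x y) →
      (∀ x ∈ E, ∀ y ∈ E, b1 x y = b2 x y) →
      E.foldl (fun acc x => PySem.List.insertBy b1 x acc) acc =
        E.foldl (fun acc x => PySem.List.insertBy b2 x acc) acc := by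
  intro E
  induction E with
  | nil => intro acc _ _; rfl
  | cons e t ih =>
      intro acc hacc hEE
      simp only [List.foldl_cons, insertBy_congr b1 b2 e acc (hacc e List.mem_cons_self)]
      refine ih _ ?_ (fun x hx y hy => hEE x (List.mem_cons_of_mem _ hx) y (List.mem_cons_of_mem _ hy))
      intro x hx y hy
      rcases (PySem.List.mem_insertBy _ _ _ _).1 hy with hy | hy
      · exact hy ▸ hEE x (List.mem_cons_of_mem _ hx) e List.mem_cons_self
      · exact hacc x (List.mem_cons_of_mem _ hx) y hy

-- B computes the main survivors followed by the sorted deduped extras.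
theorem alt_eq_append (main cls : List String) :
    GetClassifiedCategoriesInOrder_alt main cls =
      main.filter (fun c => decide (c ∈ cls)) ++
        PySem.List.sorted
          ((PySem.List.dedup cls).filter (fun c => !PySem.Set.contains (PySem.Set.ofList main) c))
          (fun x => x) false := by
  simp only [GetClassifiedCategoriesInOrder_alt]
  set F := main.filter (fun c => PySem.Set.contains (PySem.Set.ofList cls) c) with hF
  set X := (PySem.List.dedup cls).filter (fun c => !PySem.Set.contains (PySem.Set.ofList main) c) with hX
  set M := F.map (fun c => ((0 : Int), "", c)) with hM
  set E := X.map (fun c => ((1 : Int), c, c)) with hE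
  have hMform : ∀ x ∈ M, x.1 = 0 ∧ x.2.1 = "" := by
    intro x hx; rcases List.mem_map.1 hx with ⟨c, _, rfl⟩; exact ⟨rfl, rfl⟩
  have hEform : ∀ x ∈ E, x.1 = 1 ∧ x.2.1 = x.2.2 := by
    intro x hx; rcases List.mem_map.1 hx with ⟨c, _, rfl⟩; exact ⟨rfl, rfl⟩
  have hMM : ∀ x ∈ M, ∀ y ∈ M, pvBefore x y = false := by
    intro x hx y hy
    obtain ⟨h1, h2⟩ := hMform x hx; obtain ⟨h3, h4⟩ := hMform y hy
    simp [pvBefore, h1, h2, h3, h4]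
  have hEM : ∀ x ∈ E, ∀ m ∈ M, pvBefore x m = false := by
    intro x hx m hm
    obtain ⟨h1, _⟩ := hEform x hx; obtain ⟨h3, _⟩ := hMform m hm
    simp [pvBefore, h1, h3]
  -- the stable sort leaves M in place and sorts E behind it
  have hsort : PySem.List.sorted2 (M ++ E) (fun t => t.1) (fun t => t.2.1) false =
      M ++ E.foldl (fun acc x => PySem.List.insertBy pvBefore x acc) [] := by
    rw [sorted2_eq_foldl, List.foldl_append, foldl_insertBy_id M hMM [] (by simp),
      List.nil_append]
    simpa using foldl_insertBy_append E M hEM []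
  -- on E the comparator is the plain key order, so the fold is sorted-by-key
  have hEcmp : E.foldl (fun acc x => PySem.List.insertBy pvBefore x acc) [] =
      PySem.List.sorted E (fun t => t.2.1) false := by
    rw [PySem.List.sorted_eq_foldl_insertBy]
    refine foldl_insertBy_congr _ _ E [] (by simp) ?_
    intro x hx y hy
    obtain ⟨h1, _⟩ := hEform x hx; obtain ⟨h3, _⟩ := hEform y hy
    simp [pvBefore, h1, h3]
  -- sorting E by its key is mapping the sorted distinct extras
  have hXnodup : X.Nodup := List.Nodup.filter _ (PySem.List.nodup_dedup cls)
  have hsortX : (PySem.List.sorted X (fun x => x) false).Nodup :=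
    (PySem.List.sorted_perm X (fun x => x) false).nodup_iff.2 hXnodup
  have hpair : (PySem.List.sorted X (fun x => x) false).Pairwise (fun a b : String => a < b) :=
    ((PySem.List.sorted_pairwise X (fun x => x)).and hsortX).imp
      (fun h => lt_of_le_of_ne h.1 h.2)
  have hEsorted : PySem.List.sorted E (fun t => t.2.1) false =
      (PySem.List.sorted X (fun x => x) false).map (fun c => ((1 : Int), c, c)) := by
    refine PySem.List.sorted_eq_of_perm_of_pairwise_lt _ _ _ ?_ ?_
    · exact (PySem.List.sorted_perm X (fun x => x) false).map _
    · exact List.pairwise_map.2 (hpair.imp (fun h => h))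
  rw [hsort, hEcmp, hEsorted]
  simp only [List.map_append, List.map_map]
  simp [Function.comp_def, hM, hF]

-- ===== VERDICT (by name: the statement is the Claim_ definition above) =====
theorem GetClassifiedCategoriesInOrder_spec : Claim_equal_GetClassifiedCategoriesInOrder := by
  intro main cls _
  unfold Spec_GetClassifiedCategoriesInOrder
  rw [alt_eq_append]
  simp only [GetClassifiedCategoriesInOrder]
  rw [firstLoop_eq_filter, secondLoop_eq_update, PySem.Set.update_eq_append_filter, extras_eq]
  refine congrArg₂ (· ++ ·) rfl ?_
  -- the sorted set difference equals the sorted filtered dedup (same distinct elements)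
  rw [PySem.List.sorted_id_eq_sorted_id_iff_perm]
  refine (List.perm_ext_iff_of_nodup (PySem.Set.nodup_diff _ _ (PySem.Set.nodup_ofList _))
    (List.Nodup.filter _ (PySem.List.nodup_dedup cls))).2 ?_
  intro a
  rw [PySem.Set.mem_diff]
  simp [PySem.Set.mem_ofList, PySem.Set.contains]
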